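-- pv_equiv track=rewrite | github.com/ucsd-ccbb/qiimp | metadata_wizard/metadata_package_schema_builder.py | _make_parent_stack_by_env_name
-- ===== SOURCE A (Python) =====
-- def _make_parent_stack_by_env_name(env_name, parent_env_name_by_env_name, parent_stack_by_env_name):
--     if env_name not in parent_stack_by_env_name:
--         curr_stack = []
--         if env_name in parent_env_name_by_env_name:
--             parent_env_name = parent_env_name_by_env_name[env_name]
--             parent_stack_by_env_name = _make_parent_stack_by_env_name(parent_env_name, parent_env_name_by_env_name, parent_stack_by_env_name)
--             curr_stack = list(parent_stack_by_env_name[parent_env_name])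
--
--         curr_stack.append(env_name)
--         parent_stack_by_env_name[env_name] = curr_stack
--
--     return parent_stack_by_env_name
-- ===== SOURCE B (Python) =====
-- def _make_parent_stack_by_env_name(env_name, parent_env_name_by_env_name, parent_stack_by_env_name):
--     # Phase 1: walk up the parent chain collecting the unmemoized nodes.
--     path = []
--     cur = env_name
--     while cur not in parent_stack_by_env_name and cur in parent_env_name_by_env_name:
--         path.append(cur)
--         cur = parent_env_name_by_env_name[cur]
--     if cur in parent_stack_by_env_name:
--         stack = list(parent_stack_by_env_name[cur])
--     else:
--         path.append(cur)
--         stack = []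
--     # Phase 2: from topmost unmemoized ancestor down to env_name, build and memoize.
--     for node in reversed(path):
--         stack = stack + [node]
--         parent_stack_by_env_name[node] = stack
--     return parent_stack_by_env_name
-- ===== Notes on version B (the rewrite author's own statement) =====
-- stated objective: alternative
-- what changed: Replaced the recursive memoization with an iterative two-phase algorithm: first walk the parent chain collecting the unmemoized nodes, then build and store each stack top-down with a simple loop (no recursion, no re-lookup of each parent's stack after a recursive call).
import Mathlib
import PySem

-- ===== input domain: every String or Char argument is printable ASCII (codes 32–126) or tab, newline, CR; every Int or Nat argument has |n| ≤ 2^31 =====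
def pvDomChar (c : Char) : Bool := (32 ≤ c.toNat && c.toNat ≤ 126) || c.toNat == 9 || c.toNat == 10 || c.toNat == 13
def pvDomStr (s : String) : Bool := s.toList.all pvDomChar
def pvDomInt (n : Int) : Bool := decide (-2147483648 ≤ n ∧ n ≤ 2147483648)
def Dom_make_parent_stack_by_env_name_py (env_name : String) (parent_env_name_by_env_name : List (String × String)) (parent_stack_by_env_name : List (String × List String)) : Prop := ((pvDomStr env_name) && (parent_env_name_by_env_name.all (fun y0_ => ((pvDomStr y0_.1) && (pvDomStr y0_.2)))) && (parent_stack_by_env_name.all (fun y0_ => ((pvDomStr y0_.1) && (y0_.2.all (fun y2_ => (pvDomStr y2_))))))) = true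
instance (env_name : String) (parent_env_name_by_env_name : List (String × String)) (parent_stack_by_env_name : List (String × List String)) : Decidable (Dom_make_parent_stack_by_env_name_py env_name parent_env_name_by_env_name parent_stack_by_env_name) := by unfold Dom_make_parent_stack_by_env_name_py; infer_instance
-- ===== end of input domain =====

-- B replaces A's recursive memoization by an iterative walk-up-then-build-down loop (objective:
-- alternative decomposition, same cost). Python A mutates the dict in place and returns it; the
-- equivalence proved here is about the returned association list (items in insertion order).

-- ===== PORT A =====
-- A's recursion, with fuel (|parent map| + 1 suffices on every input where Python A terminates;
-- on a parent-chain cycle Python A raises RecursionError — excluded by Pre_ below).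
def pvGoA : Nat → String → PySem.Dict String String → PySem.Dict String (List String) → PySem.Dict String (List String)
  | 0, _, _, smap => smap   -- unreachable under Pre_ (Python: infinite recursion)
  | f+1, env, pmap, smap =>
    if smap.contains env then smap
    else
      match pmap.get? env with
      | none => smap.insert env ([] ++ [env])           -- curr_stack = []; curr_stack.append(env_name)
      | some p =>
          let smap' := pvGoA f p pmap smap
          -- curr_stack = list(parent_stack_by_env_name[parent_env_name]); p is always present
          -- after the recursive call (Python would raise KeyError otherwise; never happens)
          smap'.insert env (smap'.getD p [] ++ [env])

def make_parent_stack_by_env_name_py (env_name : String) (parent_env_name_by_env_name : List (String × String)) (parent_stack_by_env_name : List (String × List String)) : List (String × List String) :=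
  (pvGoA (parent_env_name_by_env_name.length + 1) env_name (PySem.Dict.mk parent_env_name_by_env_name) (PySem.Dict.mk parent_stack_by_env_name)).items

-- ===== PORT B =====
-- Phase 1 of Source B: the while loop walking up the chain, accumulating `path`.
def pvWalkB : Nat → String → PySem.Dict String String → PySem.Dict String (List String) → List String → List String × String
  | 0, cur, _, _, path => (path, cur)   -- unreachable under Pre_ (Python: infinite loop)
  | f+1, cur, pmap, smap, path =>
    if smap.contains cur then (path, cur)
    else
      match pmap.get? cur with
      | none => (path, cur)
      | some p => pvWalkB f p pmap smap (path ++ [cur])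

-- Phase 2 of Source B: `for node in reversed(path): stack = stack + [node]; smap[node] = stack`.
def pvBuildB : PySem.Dict String (List String) → List String → List String → PySem.Dict String (List String)
  | smap, _, [] => smap
  | smap, stack, n :: rest => pvBuildB (smap.insert n (stack ++ [n])) (stack ++ [n]) rest

def pvAltMain (f : Nat) (env : String) (pmap : PySem.Dict String String) (smap : PySem.Dict String (List String)) : PySem.Dict String (List String) :=
  let w := pvWalkB f env pmap smap []
  match smap.get? w.2 with
  | some base => pvBuildB smap base w.1.reverse               -- stack = list(smap[cur])
  | none => pvBuildB smap [] (w.1 ++ [w.2]).reverse           -- path.append(cur); stack = []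

def make_parent_stack_by_env_name_py_alt (env_name : String) (parent_env_name_by_env_name : List (String × String)) (parent_stack_by_env_name : List (String × List String)) : List (String × List String) :=
  (pvAltMain (parent_env_name_by_env_name.length + 1) env_name (PySem.Dict.mk parent_env_name_by_env_name) (PySem.Dict.mk parent_stack_by_env_name)).items

-- ===== PRECONDITION & SPEC =====
-- Closed-form condition on the input maps only: some ancestor of env_name within |pmap| steps of the
-- parent relation is already memoized or parentless, i.e. the parent chain ENDS rather than cycling
-- (by pigeonhole the bound |pmap| is exact: a longer all-unmemoized chain repeats a key and cycles
-- forever). Pre_ excludes exactly the inputs on which Python A raises RecursionError (returns nothing).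
def pvAnc (pmap : PySem.Dict String String) : Nat → String → Option String
  | 0, e => some e
  | k+1, e =>
      match pmap.get? e with
      | none => none
      | some p => pvAnc pmap k p

def pvChainEnds (pmap : PySem.Dict String String) (smap : PySem.Dict String (List String)) (o : Option String) : Bool :=
  match o with
  | none => true            -- chain already ran off a parentless node
  | some x => smap.contains x || (pmap.get? x).isNone

def Pre_make_parent_stack_by_env_name_py (env_name : String) (parent_env_name_by_env_name : List (String × String)) (parent_stack_by_env_name : List (String × List String)) : Prop :=
  ((List.range (parent_env_name_by_env_name.length + 1)).any fun k =>
    pvChainEnds (PySem.Dict.mk parent_env_name_by_env_name) (PySem.Dict.mk parent_stack_by_env_name)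
      (pvAnc (PySem.Dict.mk parent_env_name_by_env_name) k env_name)) = true

instance (env_name : String) (parent_env_name_by_env_name : List (String × String)) (parent_stack_by_env_name : List (String × List String)) : Decidable (Pre_make_parent_stack_by_env_name_py env_name parent_env_name_by_env_name parent_stack_by_env_name) := by unfold Pre_make_parent_stack_by_env_name_py; infer_instance

def pvWitness_make_parent_stack_by_env_name_py : String × (List (String × String)) × (List (String × List String)) :=
  ("a", [("a", "r")], [("r", ["r"])])

def Spec_make_parent_stack_by_env_name_py (env_name : String) (parent_env_name_by_env_name : List (String × String)) (parent_stack_by_env_name : List (String × List String)) (out : List (String × List String)) : Prop := out = make_parent_stack_by_env_name_py_alt env_name parent_env_name_by_env_name parent_stack_by_env_name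
instance (env_name : String) (parent_env_name_by_env_name : List (String × String)) (parent_stack_by_env_name : List (String × List String)) (out : List (String × List String)) : Decidable (Spec_make_parent_stack_by_env_name_py env_name parent_env_name_by_env_name parent_stack_by_env_name out) := by unfold Spec_make_parent_stack_by_env_name_py; infer_instance

-- ===== CLAIM (what is proved, stated in full; the proofs are below) =====
def Claim_equal_make_parent_stack_by_env_name_py : Prop := ∀ (env_name : String) (parent_env_name_by_env_name : List (String × String)) (parent_stack_by_env_name : List (String × List String)), Dom_make_parent_stack_by_env_name_py env_name parent_env_name_by_env_name parent_stack_by_env_name → Pre_make_parent_stack_by_env_name_py env_name parent_env_name_by_env_name parent_stack_by_env_name → Spec_make_parent_stack_by_env_name_py env_name parent_env_name_by_env_name parent_stack_by_env_name (make_parent_stack_by_env_name_py env_name parent_env_name_by_env_name parent_stack_by_env_name)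

-- ===== LEMMAS AND PROOFS =====

-- proof-side reformulation of Pre_: the walk terminates within fuel f
def pvChainOk : Nat → String → PySem.Dict String String → PySem.Dict String (List String) → Bool
  | 0, _, _, _ => false
  | f+1, env, pmap, smap =>
    if smap.contains env then true
    else
      match pmap.get? env with
      | none => true
      | some p => pvChainOk f p pmap smap

theorem pvChainOk_eq_any (pmap : PySem.Dict String String) (smap : PySem.Dict String (List String)) :
    ∀ (f : Nat) (env : String), pvChainOk f env pmap smap =
      (List.range f).any (fun k => pvChainEnds pmap smap (pvAnc pmap k env)) := by
  intro f
  induction f with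
  | zero => intro env; simp [pvChainOk]
  | succ f ih =>
      intro env
      rw [List.range_succ_eq_map]
      simp only [List.any_cons, List.any_map]
      by_cases hm : smap.contains env
      · simp [pvChainOk, hm, pvChainEnds, pvAnc]
      · cases hp : pmap.get? env with
        | none => simp [pvChainOk, hm, hp, pvChainEnds, pvAnc]
        | some p =>
            simp only [pvChainOk, hm, hp, pvChainEnds, pvAnc, ih p,
              Bool.false_eq_true, if_false, Option.isNone_some, Bool.or_false, Bool.false_or]
            congr 1
            funext k
            simp [Function.comp, pvAnc, hp]

-- the walk's `path` parameter is a pure accumulator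
theorem pvWalkB_acc (f : Nat) (pmap : PySem.Dict String String) (smap : PySem.Dict String (List String)) :
    ∀ (cur : String) (acc : List String),
      pvWalkB f cur pmap smap acc = (acc ++ (pvWalkB f cur pmap smap []).1, (pvWalkB f cur pmap smap []).2) := by
  induction f with
  | zero => intro cur acc; simp [pvWalkB]
  | succ f ih =>
      intro cur acc
      simp only [pvWalkB]
      by_cases h : smap.contains cur
      · simp [h]
      · cases hp : pmap.get? cur with
        | none => simp [h]
        | some p =>
            simp only [h, Bool.false_eq_true, if_false, List.nil_append]
            rw [ih p (acc ++ [cur]), ih p [cur]]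
            simp

-- processing `l ++ [x]` is processing `l` then one final insert of the full stack
theorem pvBuildB_snoc (l : List String) : ∀ (s : PySem.Dict String (List String)) (st : List String) (x : String),
    pvBuildB s st (l ++ [x]) = (pvBuildB s st l).insert x (st ++ l ++ [x]) := by
  induction l with
  | nil => intro s st x; simp [pvBuildB]
  | cons n rest ih =>
      intro s st x
      simp only [List.cons_append, pvBuildB]
      rw [ih]
      simp [List.append_assoc]

-- the stack B ends up storing for the query node
def pvStackOf (f : Nat) (env : String) (pmap : PySem.Dict String String) (smap : PySem.Dict String (List String)) : List String :=
  let w := pvWalkB f env pmap smap []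
  match smap.get? w.2 with
  | some base => base ++ w.1.reverse
  | none => (w.1 ++ [w.2]).reverse

theorem pvMain (pmap : PySem.Dict String String) :
    ∀ (f : Nat) (env : String) (smap : PySem.Dict String (List String)),
      pvChainOk f env pmap smap = true →
      pvGoA f env pmap smap = pvAltMain f env pmap smap ∧
      (pvAltMain f env pmap smap).getD env [] = pvStackOf f env pmap smap := by
  intro f
  induction f with
  | zero => intro env smap h; simp [pvChainOk] at h
  | succ f ih =>
      intro env smap h
      by_cases hm : smap.contains env
      · -- already memoized: walk stops immediately, nothing is built
        have hg : ∃ b, smap.get? env = some b := by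
          have := PySem.Dict.contains_eq_isSome_get? (d := smap) (k := env)
          rw [hm] at this
          cases hs : smap.get? env with
          | none => rw [hs] at this; simp at this
          | some b => exact ⟨b, rfl⟩
        obtain ⟨b, hb⟩ := hg
        constructor
        · simp [pvGoA, hm, pvAltMain, pvWalkB, hb, pvBuildB]
        · simp [pvAltMain, pvWalkB, hm, hb, pvBuildB, pvStackOf,
                PySem.Dict.getD_of_get?_eq_some (h := hb)]
      · have hgn : smap.get? env = none := by
          have := PySem.Dict.contains_eq_isSome_get? (d := smap) (k := env)
          rw [Bool.eq_false_iff.mpr hm] at this   -- contains = false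
          cases hs : smap.get? env with
          | none => rfl
          | some b => rw [hs] at this; simp at this
        cases hp : pmap.get? env with
        | none =>
            -- parentless root: both insert env ↦ [env]
            constructor
            · simp [pvGoA, hm, hp, pvAltMain, pvWalkB, hgn, pvBuildB]
            · simp [pvAltMain, pvWalkB, hm, hp, hgn, pvBuildB, pvStackOf,
                    PySem.Dict.getD_insert_self]
        | some p =>
            have hch : pvChainOk f p pmap smap = true := by
              simpa [pvChainOk, hm, hp] using h
            obtain ⟨ihEq, ihStk⟩ := ih p smap hch
            -- unfold one walk step at env and push the accumulator out
            have hw : pvWalkB (f+1) env pmap smap [] =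
                ([env] ++ (pvWalkB f p pmap smap []).1, (pvWalkB f p pmap smap []).2) := by
              simp only [pvWalkB, hm, hp]
              simpa using pvWalkB_acc f pmap smap p [env]
            set w := pvWalkB f p pmap smap [] with hwdef
            -- B at fuel f+1 is B at fuel f followed by one insert of (pvStackOf f p) ++ [env]
            have hstep : pvAltMain (f+1) env pmap smap =
                (pvAltMain f p pmap smap).insert env (pvStackOf f p pmap smap ++ [env]) := by
              cases hc : smap.get? w.2 with
              | some base =>
                  simp only [pvAltMain, hw, hc, pvStackOf, ← hwdef]
                  rw [show ([env] ++ w.1).reverse = w.1.reverse ++ [env] by simp]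
                  rw [pvBuildB_snoc]
              | none =>
                  simp only [pvAltMain, hw, hc, pvStackOf, ← hwdef]
                  rw [show (([env] ++ w.1) ++ [w.2]).reverse = (w.1 ++ [w.2]).reverse ++ [env] by simp]
                  rw [pvBuildB_snoc]
                  simp
            have hstk : pvStackOf (f+1) env pmap smap = pvStackOf f p pmap smap ++ [env] := by
              cases hc : smap.get? w.2 with
              | some base => simp [pvStackOf, hw, hc, ← hwdef]
              | none => simp [pvStackOf, hw, hc, ← hwdef]
            constructor
            · rw [hstep]
              simp only [pvGoA, hm, hp, Bool.false_eq_true, if_false, ihEq]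
              rw [show (pvAltMain f p pmap smap).getD p [] = pvStackOf f p pmap smap from ihStk]
            · rw [hstep, hstk, PySem.Dict.getD_insert_self]

-- ===== VERDICT (by name: the statement is the Claim_ definition above) =====
theorem make_parent_stack_by_env_name_py_spec : Claim_equal_make_parent_stack_by_env_name_py := by
  intro env pmap smap _ hpre
  unfold Spec_make_parent_stack_by_env_name_py
  unfold make_parent_stack_by_env_name_py make_parent_stack_by_env_name_py_alt
  have hck : pvChainOk (pmap.length + 1) env (PySem.Dict.mk pmap) (PySem.Dict.mk smap) = true := by
    rw [pvChainOk_eq_any]; exact hpre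
  rw [(pvMain (PySem.Dict.mk pmap) (pmap.length + 1) env (PySem.Dict.mk smap) hck).1]
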